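-- pv_equiv track=rewrite | github.com/lorenzotaccini/pyFunMQTT | Utils/UserFunctions/user_functions.py | serve
-- ===== SOURCE A (Python) =====
-- def serve(params: dict, data: list) -> dict:
--     res = {}
--     for elem in data:  # for every row (a row is a dict)
--         for k, v in elem.items():  # for every column
--             if k in params['parameters']:
--                 if k not in res.keys():
--                     res[k] = []
--                 res[k].append(v)
--     return res
-- ===== SOURCE B (Python) =====
-- def serve(params: dict, data: list) -> dict:
--     wanted = set(params['parameters'])
--     order = dict.fromkeys(k for row in data for k in row if k in wanted)
--     return {k: [row[k] for row in data if k in row] for k in order}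
-- ===== Notes on version B (the rewrite author's own statement) =====
-- stated objective: alternative
-- what changed: A grows per-key lists one cell at a time inside a row-by-row fold over a mutable result dict; B first computes the ordered distinct key set, then builds each key's whole column in one gather over the rows (a transpose: per-key outer loop instead of per-cell dict mutation).
-- outside the precondition, e.g. on serve({}, []): A returns {}, B raises KeyError
import Mathlib
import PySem

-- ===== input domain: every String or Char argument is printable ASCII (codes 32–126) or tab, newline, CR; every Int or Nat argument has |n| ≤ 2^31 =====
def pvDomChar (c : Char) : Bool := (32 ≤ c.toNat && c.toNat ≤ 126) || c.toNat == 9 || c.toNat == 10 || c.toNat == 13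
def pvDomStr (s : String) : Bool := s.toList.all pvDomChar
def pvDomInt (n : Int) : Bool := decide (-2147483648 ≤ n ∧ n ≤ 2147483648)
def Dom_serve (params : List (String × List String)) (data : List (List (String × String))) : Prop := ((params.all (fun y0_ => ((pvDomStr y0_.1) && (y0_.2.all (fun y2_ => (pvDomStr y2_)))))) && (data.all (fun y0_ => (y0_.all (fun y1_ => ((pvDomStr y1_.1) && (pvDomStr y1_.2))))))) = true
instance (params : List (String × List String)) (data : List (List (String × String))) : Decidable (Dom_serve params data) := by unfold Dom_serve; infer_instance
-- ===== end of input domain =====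

-- One line: B computes the ordered distinct key set first, then gathers each key's
-- whole column in one pass over the rows, instead of A's per-cell mutation of a result dict.

-- ===== PORT A =====
-- res = {}; for elem in data: for (k, v) in elem.items(): if k in params['parameters']:
--   if k not in res: res[k] = []
--   res[k].append(v)
def serve (params : List (String × List String)) (data : List (List (String × String))) : List (String × List String) :=
  let ps := PySem.Dict.getD (PySem.Dict.mk params) "parameters" []   -- params['parameters'] (Pre_ guarantees the key is present)
  (data.foldl (fun res elem =>
    elem.foldl (fun res kv =>
      if ps.contains kv.1 then
        let res := if res.contains kv.1 then res else res.insert kv.1 []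
        res.modify kv.1 [] (fun l => l ++ [kv.2])     -- res[k].append(v)
      else res) res) PySem.Dict.empty).items

-- ===== PORT B =====
-- wanted = set(params['parameters'])
-- order = dict.fromkeys(k for row in data for k in row if k in wanted)
-- return {k: [row[k] for row in data if k in row] for k in order}
def serve_alt (params : List (String × List String)) (data : List (List (String × String))) : List (String × List String) :=
  let wanted := PySem.Set.ofList (PySem.Dict.getD (PySem.Dict.mk params) "parameters" [])
  let order := PySem.List.dedup ((data.flatMap (fun row => row.map (·.1))).filter (fun k => wanted.contains k))
  order.map (fun k => (k, data.filterMap (fun row => (PySem.Dict.mk row).get? k)))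

-- ===== PRECONDITION & SPEC =====
-- Pre_ excludes (a) params without the key "parameters": A raises KeyError on them whenever
-- some row is non-empty, and B always does, since B reads params['parameters'] up front while
-- A's lazy per-cell lookup happens to return {} when no cell is ever reached; and
-- (b) rows whose association lists repeat a key, which do not represent any Python dict
-- (a Python dict row cannot have duplicate keys, so this excludes no Python-reachable input).
def Pre_serve (params : List (String × List String)) (data : List (List (String × String))) : Prop :=
  "parameters" ∈ params.map (·.1) ∧ ∀ row ∈ data, (row.map (·.1)).Nodup
instance (params : List (String × List String)) (data : List (List (String × String))) : Decidable (Pre_serve params data) := by unfold Pre_serve; infer_instance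

def pvWitness_serve : (List (String × List String)) × (List (List (String × String))) :=
  ([("parameters", ["a", "b"])], [[("a", "1"), ("c", "2")], [("b", "3"), ("a", "4")]])

def Spec_serve (params : List (String × List String)) (data : List (List (String × String))) (out : List (String × List String)) : Prop := out = serve_alt params data
instance (params : List (String × List String)) (data : List (List (String × String))) (out : List (String × List String)) : Decidable (Spec_serve params data out) := by unfold Spec_serve; infer_instance

-- ===== CLAIM (what is proved, stated in full; the proofs are below) =====
def Claim_equal_serve : Prop := ∀ (params : List (String × List String)) (data : List (List (String × String))), Dom_serve params data → Pre_serve params data → Spec_serve params data (serve params data)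

-- ===== LEMMAS AND PROOFS =====

-- A's nested fold over rows is the fold over the flattened cell list.
theorem pv_foldl_flat (data : List (List (String × String)))
    (f : PySem.Dict String (List String) → (String × String) → PySem.Dict String (List String))
    (d : PySem.Dict String (List String)) :
    data.foldl (fun res elem => elem.foldl f res) d = (data.flatMap id).foldl f d := by
  induction data generalizing d with
  | nil => rfl
  | cons r t ih => simp [List.flatMap_cons, List.foldl_append, ih]

-- A's cell step ('create empty then append') is Dict.modify with default [].
theorem pv_step_modify (d : PySem.Dict String (List String)) (k : String) (v : String) :
    ((if d.contains k then d else d.insert k []).modify k [] (fun l => l ++ [v]))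
      = d.modify k [] (fun l => l ++ [v]) := by
  by_cases h : d.contains k
  · simp [h]
  · have hc : d.contains k = false := by simpa using h
    simp only [hc, Bool.false_eq_true, if_false, PySem.Dict.modify,
               PySem.Dict.getD_insert_self, PySem.Dict.insert_insert_self]
    rw [PySem.Dict.getD_of_not_contains (h := hc)]

-- The guarded fold over cells equals the modify-fold over the kept cells.
theorem pv_fold_filter (ps : List String) (l : List (String × String))
    (d : PySem.Dict String (List String)) :
    l.foldl (fun res kv =>
      if ps.contains kv.1 then
        (if res.contains kv.1 then res else res.insert kv.1 []).modify kv.1 [] (fun l => l ++ [kv.2])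
      else res) d
    = (l.filter (fun kv => ps.contains kv.1)).foldl
        (fun res kv => res.modify kv.1 [] (fun l => l ++ [kv.2])) d := by
  induction l generalizing d with
  | nil => rfl
  | cons p t ih =>
    rw [List.foldl_cons, List.filter_cons]
    by_cases h : ps.contains p.1
    · simp only [h, if_true, List.foldl_cons]
      rw [pv_step_modify, ih]
    · simp only [h, Bool.false_eq_true, if_false, ih]

-- A row with distinct keys contributes exactly its (unique) entry for k.
theorem pv_row_get (row : List (String × String)) (k : String)
    (h : (row.map (·.1)).Nodup) :
    (row.filter (fun p => p.1 == k)).map (·.2) = ((PySem.Dict.mk row).get? k).toList := by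
  induction row with
  | nil => simp [PySem.Dict.get?]
  | cons p t ih =>
    simp only [List.map_cons, List.nodup_cons] at h
    rw [PySem.Dict.get?_mk_cons]
    by_cases hk : p.1 = k
    · subst hk
      have hnil : t.filter (fun q => q.1 == p.1) = [] := by
        apply List.filter_eq_nil_iff.mpr
        intro q hq hq'
        exact h.1 (List.mem_map.mpr ⟨q, hq, by simpa using hq'⟩)
      simp [hnil]
    · simp [hk, ih h.2]

-- The per-key columns: all kept cells with key k, in row order, are B's gather.
theorem pv_cols (data : List (List (String × String))) (k : String)
    (h : ∀ row ∈ data, (row.map (·.1)).Nodup) :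
    ((data.flatMap id).filter (fun p => p.1 == k)).map (·.2)
      = data.filterMap (fun row => (PySem.Dict.mk row).get? k) := by
  induction data with
  | nil => rfl
  | cons r t ih =>
    rw [List.flatMap_cons]
    simp only [id_eq]
    rw [List.filter_append, List.map_append,
        pv_row_get r k (h r (by simp)), ih (fun row hr => h row (by simp [hr]))]
    cases hg : (PySem.Dict.mk r).get? k <;> simp [hg]

-- Keys of the flattened row list, rows first.
theorem pv_flat_keys (data : List (List (String × String))) :
    data.flatMap (fun row => row.map (·.1)) = (data.flatMap id).map (·.1) := by
  induction data with
  | nil => rfl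
  | cons r t ih => simp only [List.flatMap_cons, List.map_append, ih, id_eq]

-- ===== VERDICT (by name: the statement is the Claim_ definition above) =====
theorem serve_spec : Claim_equal_serve := by
  intro params data _ hpre
  unfold Spec_serve serve serve_alt
  simp only []
  set ps := PySem.Dict.getD (PySem.Dict.mk params) "parameters" [] with hps
  rw [pv_foldl_flat, pv_fold_filter]
  set L := (data.flatMap id).filter (fun kv => ps.contains kv.1) with hL
  have hnd := PySem.Dict.nodup_keys_foldl_modify_key L (fun kv => kv.1) []
    (fun d kv => fun l => l ++ [kv.2]) PySem.Dict.empty (by simp)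
  rw [PySem.Dict.items_eq_map_keys _ hnd []]
  have hkeys : (L.foldl (fun res kv => res.modify kv.1 [] (fun l => l ++ [kv.2]))
      PySem.Dict.empty).keys = PySem.Set.ofList (L.map (fun kv => kv.1)) := by
    rw [PySem.Dict.keys_foldl_modify_key]
    simp [PySem.Dict.keys_empty, PySem.Set.update, PySem.Set.ofList_eq_foldl]
  have horder : PySem.List.dedup (((data.flatMap (fun row => row.map (·.1)))).filter
      (fun k => (PySem.Set.ofList ps).contains k)) = PySem.Set.ofList (L.map (fun kv => kv.1)) := by
    rw [pv_flat_keys, List.filter_map, PySem.List.dedup_eq_ofList, hL]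
    congr 1
    congr 1
    exact List.filter_congr (fun p _ => by simp [Function.comp])
  rw [hkeys, horder]
  apply List.map_congr_left
  intro k hk
  have hkps : ps.contains k = true := by
    have hkmem : k ∈ L.map (fun kv => kv.1) := by
      rw [← PySem.Set.mem_ofList]; exact hk
    obtain ⟨p, hp, rfl⟩ := List.mem_map.mp hkmem
    exact (List.mem_filter.mp
      (show p ∈ List.filter (fun kv => ps.contains kv.1) (List.flatMap id data) from hL ▸ hp)).2
  have hcol : (L.filter (fun p => p.1 == k)).map (·.2)
      = ((data.flatMap id).filter (fun p => p.1 == k)).map (·.2) := by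
    rw [hL, List.filter_filter]
    congr 1
    apply List.filter_congr
    intro p _
    by_cases hpk : p.1 = k
    · simp only [hpk]
      simp only [List.contains_iff_mem] at hkps
      simp [hkps]
    · simp [hpk]
  rw [PySem.Dict.getD_foldl_modify_append, PySem.Dict.getD_empty]
  simp only [List.nil_append]
  rw [hcol, pv_cols data k hpre.2]
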